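-- pv_equiv track=rewrite | github.com/Remv123/DB_SQLite | Pruebas/Pruebas/Codigos/ValidacionesCuentas.py | ValidarUsuario
-- ===== SOURCE A (Python) =====
-- import string,re
--
-- def ValidarUsuario(Usuario,Mensaje,Errores):
--     letras=string.ascii_letters
--     digitos=string.digits
--     numeros=0
--     Letras=0
--     for elem in Usuario:
--         if elem in letras:
--             Letras+=1
--         if elem in digitos:
--             numeros+=1
--     if Letras!=2:
--         Mensaje+="El usuario no cumple con el numero requerido de letras\n"
--         Errores+=1
--     if numeros!=10:
--         Mensaje+="El usuario no cumple con el numero requerido de numeros\n"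
--         Errores+=1
--     return Mensaje,Errores
-- ===== SOURCE B (Python) =====
-- import string
--
-- def ValidarUsuario(Usuario, Mensaje, Errores):
--     letras = string.ascii_letters
--     digitos = string.digits
--     freq = {}
--     for ch in Usuario:
--         freq[ch] = freq.get(ch, 0) + 1
--     Letras = sum(cnt for ch, cnt in freq.items() if ch in letras)
--     numeros = sum(cnt for ch, cnt in freq.items() if ch in digitos)
--     if Letras != 2:
--         Mensaje += "El usuario no cumple con el numero requerido de letras\n"
--         Errores += 1
--     if numeros != 10:
--         Mensaje += "El usuario no cumple con el numero requerido de numeros\n"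
--         Errores += 1
--     return Mensaje, Errores
-- ===== Notes on version B (the rewrite author's own statement) =====
-- stated objective: alternative
-- what changed: B first builds a character-frequency dictionary of Usuario and obtains the letter and digit totals by summing frequency-table entries whose key lies in the same ascii_letters/digits constants, instead of A's per-character double membership test inside one loop.
import Mathlib
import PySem

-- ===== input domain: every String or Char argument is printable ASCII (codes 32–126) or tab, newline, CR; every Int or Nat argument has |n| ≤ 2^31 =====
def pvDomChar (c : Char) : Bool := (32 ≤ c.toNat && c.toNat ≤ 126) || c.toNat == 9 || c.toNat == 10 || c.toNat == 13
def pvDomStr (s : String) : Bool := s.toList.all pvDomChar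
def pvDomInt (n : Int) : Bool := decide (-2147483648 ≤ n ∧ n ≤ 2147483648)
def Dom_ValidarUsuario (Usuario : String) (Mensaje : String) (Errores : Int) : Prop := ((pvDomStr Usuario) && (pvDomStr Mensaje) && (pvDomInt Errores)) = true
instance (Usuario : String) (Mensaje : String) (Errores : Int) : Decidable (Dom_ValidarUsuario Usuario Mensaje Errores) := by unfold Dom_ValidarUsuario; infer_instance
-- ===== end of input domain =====

-- B replaces A's single pass with two membership tests per character by a character-frequency
-- dictionary summed over the same ascii_letters/digits constants (objective: alternative).

-- string.ascii_letters / string.digits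
def pvLetras : String := "abcdefghijklmnopqrstuvwxyzABCDEFGHIJKLMNOPQRSTUVWXYZ"
def pvDigitos : String := "0123456789"
def pvMsgLetras : String := "El usuario no cumple con el numero requerido de letras\n"
def pvMsgNumeros : String := "El usuario no cumple con el numero requerido de numeros\n"

-- ===== PORT A =====
-- 'elem in letras' on a 1-char string is Python substring membership: PySem.Str.isIn
def ValidarUsuario (Usuario : String) (Mensaje : String) (Errores : Int) : String × Int :=
  let letras := pvLetras
  let digitos := pvDigitos
  -- state (numeros, Letras), both start at 0
  let nl := Usuario.toList.foldl
    (fun (st : Int × Int) elem =>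
      let st2 := if PySem.Str.isIn (String.ofList [elem]) letras then (st.1, st.2 + 1) else st
      if PySem.Str.isIn (String.ofList [elem]) digitos then (st2.1 + 1, st2.2) else st2)
    ((0 : Int), (0 : Int))
  let me1 := if nl.2 ≠ 2 then (Mensaje ++ pvMsgLetras, Errores + 1) else (Mensaje, Errores)
  let me2 := if nl.1 ≠ 10 then (me1.1 ++ pvMsgNumeros, me1.2 + 1) else me1
  me2

-- ===== PORT B =====
def ValidarUsuario_alt (Usuario : String) (Mensaje : String) (Errores : Int) : String × Int :=
  let letras := pvLetras
  let digitos := pvDigitos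
  -- freq = {}; for ch in Usuario: freq[ch] = freq.get(ch, 0) + 1
  let freq : PySem.Dict Char Int :=
    Usuario.toList.foldl (fun d ch => d.insert ch (d.getD ch 0 + 1)) PySem.Dict.empty
  -- Letras = sum(cnt for ch, cnt in freq.items() if ch in letras)
  let Letras : Int := freq.items.foldl
    (fun acc kv => if PySem.Str.isIn (String.ofList [kv.1]) letras then acc + kv.2 else acc) 0
  let numeros : Int := freq.items.foldl
    (fun acc kv => if PySem.Str.isIn (String.ofList [kv.1]) digitos then acc + kv.2 else acc) 0
  let me1 := if Letras ≠ 2 then (Mensaje ++ pvMsgLetras, Errores + 1) else (Mensaje, Errores)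
  let me2 := if numeros ≠ 10 then (me1.1 ++ pvMsgNumeros, me1.2 + 1) else me1
  me2

-- ===== PRECONDITION & SPEC =====
def Spec_ValidarUsuario (Usuario : String) (Mensaje : String) (Errores : Int) (out : String × Int) : Prop := out = ValidarUsuario_alt Usuario Mensaje Errores
instance (Usuario : String) (Mensaje : String) (Errores : Int) (out : String × Int) : Decidable (Spec_ValidarUsuario Usuario Mensaje Errores out) := by unfold Spec_ValidarUsuario; infer_instance

-- ===== CLAIM (what is proved, stated in full; the proofs are below) =====
def Claim_equal_ValidarUsuario : Prop := ∀ (Usuario : String) (Mensaje : String) (Errores : Int), Dom_ValidarUsuario Usuario Mensaje Errores → Spec_ValidarUsuario Usuario Mensaje Errores (ValidarUsuario Usuario Mensaje Errores)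

-- ===== LEMMAS AND PROOFS =====

-- A's loop computes (countP digit, countP letter).
theorem pvFoldA (pl pd : Char → Bool) (l : List Char) (a b : Int) :
    l.foldl
      (fun (st : Int × Int) elem =>
        let st2 := if pl elem then (st.1, st.2 + 1) else st
        if pd elem then (st2.1 + 1, st2.2) else st2)
      (a, b)
    = (a + (l.countP pd : Int), b + (l.countP pl : Int)) := by
  induction l generalizing a b with
  | nil => simp
  | cons x xs ih =>
    by_cases h1 : pl x <;> by_cases h2 : pd x <;>
      simp [h1, h2, ih, Prod.ext_iff] <;> omega

theorem pvCastSum (l : List ℕ) : (l.map (Nat.cast : ℕ → ℤ)).sum = (l.sum : ℤ) := by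
  induction l with
  | nil => simp
  | cons x xs ih =>
    rw [List.map_cons, List.sum_cons, List.sum_cons, ih]
    push_cast
    ring

-- B's sum-over-items loop as a filtered sum.
theorem pvFoldB (p : Char → Bool) (L : List (Char × Int)) (a : Int) :
    L.foldl (fun acc kv => if p kv.1 then acc + kv.2 else acc) a
    = a + ((L.filter (fun kv => p kv.1)).map Prod.snd).sum := by
  induction L generalizing a with
  | nil => simp
  | cons x xs ih =>
    by_cases h : p x.1 <;> simp [h, ih] <;> ring

-- Summing multiplicities of the distinct characters satisfying p gives countP p.
theorem pvSumCounts (p : Char → Bool) (us : List Char) :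
    (((PySem.Set.ofList us).filter p).map (fun k => ((us.count k : Int)))).sum
    = (us.countP p : Int) := by
  have hperm : (PySem.Set.ofList us).Perm us.dedup :=
    (List.perm_ext_iff_of_nodup (PySem.Set.nodup_ofList us) us.nodup_dedup).mpr
      (fun a => by rw [PySem.Set.mem_ofList, List.mem_dedup])
  have h2 : ((((PySem.Set.ofList us).filter p).map (fun k => (us.count k : Int)))).sum
      = (((us.dedup.filter p).map (fun k => (us.count k : Int)))).sum :=
    List.Perm.sum_eq (List.Perm.map _ (List.Perm.filter p hperm))
  rw [h2]
  have h3 := List.sum_map_count_dedup_filter_eq_countP p us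
  calc (((us.dedup.filter p).map (fun k => (us.count k : Int)))).sum
      = (((us.dedup.filter p).map (fun x => us.count x)).map (Nat.cast : ℕ → ℤ)).sum := by
        rw [List.map_map]; rfl
    _ = (us.countP p : Int) := by rw [pvCastSum, h3]

-- B's per-alphabet total equals A's countP.
theorem pvTotal (p : Char → Bool) (us : List Char) :
    ((PySem.Dict.counter us).items).foldl
      (fun acc kv => if p kv.1 then acc + kv.2 else acc) 0
    = (us.countP p : Int) := by
  rw [PySem.Dict.items_counter, pvFoldB]
  have : ((PySem.Set.ofList us).map (fun k => (k, (us.count k : Int)))).filter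
        (fun kv => p kv.1)
      = ((PySem.Set.ofList us).filter p).map (fun k => (k, (us.count k : Int))) := by
    rw [List.filter_map]; rfl
  rw [this, List.map_map]
  have := pvSumCounts p us
  simpa using this

-- ===== VERDICT (by name: the statement is the Claim_ definition above) =====
theorem ValidarUsuario_spec : Claim_equal_ValidarUsuario := by
  intro Usuario Mensaje Errores _
  show ValidarUsuario Usuario Mensaje Errores = ValidarUsuario_alt Usuario Mensaje Errores
  unfold ValidarUsuario ValidarUsuario_alt
  dsimp only
  rw [PySem.Dict.foldl_insert_getD_add_one_eq_counter]
  rw [pvFoldA (fun e => PySem.Str.isIn (String.ofList [e]) pvLetras)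
      (fun e => PySem.Str.isIn (String.ofList [e]) pvDigitos)]
  rw [pvTotal (fun c => PySem.Str.isIn (String.ofList [c]) pvLetras),
      pvTotal (fun c => PySem.Str.isIn (String.ofList [c]) pvDigitos)]
  simp
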